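-- pv_equiv track=rewrite | github.com/deconsulent/pw1 | src/game_core.py | can_reach_terminal
-- ===== SOURCE A (Python) =====
-- from typing import Dict, List, Optional
--
-- def can_reach_terminal(number: int, memo: Optional[Dict[int, bool]] = None) -> bool:
--     if memo is None:
--         memo = {}
--     if number <= 10:
--         return True
--     if number in memo:
--         return memo[number]
--
--     reachable = False
--     if number % 2 == 0:
--         reachable = reachable or can_reach_terminal(number // 2, memo)
--     if number % 3 == 0:
--         reachable = reachable or can_reach_terminal(number // 3, memo)
--
--     memo[number] = reachable
--     return reachable
-- ===== SOURCE B (Python) =====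
-- def can_reach_terminal(number, memo=None):
--     # Iterative breadth-first level-set search instead of memoized recursion.
--     # Note: unlike A, this does not mutate the caller's memo dict.
--     table = memo or {}
--     frontier = {number}
--     while frontier:
--         if any(n <= 10 for n in frontier):
--             return True
--         if any(table.get(n, False) for n in frontier):
--             return True
--         frontier = {n // d
--                     for n in frontier if n not in table
--                     for d in (2, 3) if n % d == 0}
--     return False
-- ===== Notes on version B (the rewrite author's own statement) =====
-- stated objective: alternative
-- what changed: Replaced A's memoized mutating top-down recursion by an iterative breadth-first search over level sets of reachable quotients (no recursion, no mutation of the caller's memo).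
import Mathlib
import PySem

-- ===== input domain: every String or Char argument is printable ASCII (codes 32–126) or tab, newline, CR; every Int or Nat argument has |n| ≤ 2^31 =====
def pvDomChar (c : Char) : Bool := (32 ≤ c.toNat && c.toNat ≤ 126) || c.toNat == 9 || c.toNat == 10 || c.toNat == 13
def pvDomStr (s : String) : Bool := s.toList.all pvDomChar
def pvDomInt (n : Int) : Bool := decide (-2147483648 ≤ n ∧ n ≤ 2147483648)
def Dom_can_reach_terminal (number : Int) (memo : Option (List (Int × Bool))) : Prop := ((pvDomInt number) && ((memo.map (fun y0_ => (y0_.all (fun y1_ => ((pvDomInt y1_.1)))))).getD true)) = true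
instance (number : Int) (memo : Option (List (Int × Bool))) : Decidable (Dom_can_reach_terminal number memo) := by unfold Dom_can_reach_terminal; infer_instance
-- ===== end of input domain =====

-- B replaces A's memoized mutating recursion by an iterative breadth-first level-set
-- search (alternative algorithm, similar cost); A mutates the caller's memo dict, B does
-- not — the equivalence proved here is about the RETURN value only.
-- (Both ports carry a Nat fuel that only makes the recursion structural; the fuel strictly
-- dominates the needed depth, so behaviour is that of the Python.)

-- ===== PORT A =====
-- A, step for step: `number <= 10`, memo lookup, accumulator `reachable` with
-- short-circuit `or`, final `memo[number] = reachable`; the dict is threaded as state.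
def canAGo : Nat → Int → PySem.Dict Int Bool → Bool × PySem.Dict Int Bool
  | 0, _, memo => (true, memo)   -- never reached: fuel always exceeds n.toNat
  | fuel + 1, n, memo =>
    if n ≤ 10 then (true, memo)
    else
      match memo.get? n with
      | some b => (b, memo)
      | none =>
        -- reachable = False; if number % 2 == 0: reachable = reachable or rec(number // 2)
        let r1m1 : Bool × PySem.Dict Int Bool :=
          if PySem.Int.mod n 2 = 0 then
            let p := canAGo fuel (PySem.Int.floordiv n 2) memo
            (false || p.1, p.2)
          else (false, memo)
        -- if number % 3 == 0: reachable = reachable or rec(number // 3)   (short-circuit)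
        let r2m2 : Bool × PySem.Dict Int Bool :=
          if PySem.Int.mod n 3 = 0 then
            if r1m1.1 then r1m1
            else
              let q := canAGo fuel (PySem.Int.floordiv n 3) r1m1.2
              (r1m1.1 || q.1, q.2)
          else r1m1
        (r2m2.1, r2m2.2.insert n r2m2.1)

def can_reach_terminal (number : Int) (memo : Option (List (Int × Bool))) : Bool :=
  (canAGo (number.toNat + 1) number (PySem.Dict.mk (memo.getD []))).1

-- ===== PORT B =====
-- successors of one frontier element: {n // d for d in (2, 3) if n not in table and n % d == 0}
def pvSucc (table : PySem.Dict Int Bool) (n : Int) : List Int :=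
  if table.contains n then []
  else (if PySem.Int.mod n 2 = 0 then [PySem.Int.floordiv n 2] else []) ++
       (if PySem.Int.mod n 3 = 0 then [PySem.Int.floordiv n 3] else [])

-- the next level: successors of every frontier element, in iteration order
def pvLevel (table : PySem.Dict Int Bool) : List Int → List Int
  | [] => []
  | n :: rest => pvSucc table n ++ pvLevel table rest

-- fuel bound: the largest element of the frontier (as a Nat); it strictly decreases each level
def pvMeas (l : List Int) : Nat := l.foldr (fun x acc => max x.toNat acc) 0

-- B, step for step: while frontier: any(n <= 10), any(table.get(n, False)), next level set
def canBLoop : Nat → PySem.Dict Int Bool → List Int → Bool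
  | 0, _, _ => false   -- never reached: fuel always exceeds pvMeas frontier
  | fuel + 1, table, frontier =>
    if frontier = [] then false
    else if frontier.any (fun n => decide (n ≤ 10)) then true
    else if frontier.any (fun n => table.getD n false) then true
    else canBLoop fuel table (PySem.Set.ofList (pvLevel table frontier))

def can_reach_terminal_alt (number : Int) (memo : Option (List (Int × Bool))) : Bool :=
  -- table = memo or {}  (None and the empty dict both give {})
  let table : PySem.Dict Int Bool :=
    PySem.Dict.mk (match memo with
      | none => []
      | some l => if l.isEmpty then [] else l)
  canBLoop (pvMeas (PySem.Set.ofList [number]) + 1) table (PySem.Set.ofList [number])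

-- ===== PRECONDITION & SPEC =====
def Spec_can_reach_terminal (number : Int) (memo : Option (List (Int × Bool))) (out : Bool) : Prop := out = can_reach_terminal_alt number memo
instance (number : Int) (memo : Option (List (Int × Bool))) (out : Bool) : Decidable (Spec_can_reach_terminal number memo out) := by unfold Spec_can_reach_terminal; infer_instance

-- ===== CLAIM (what is proved, stated in full; the proofs are below) =====
def Claim_equal_can_reach_terminal : Prop := ∀ (number : Int) (memo : Option (List (Int × Bool))), Dom_can_reach_terminal number memo → Spec_can_reach_terminal number memo (can_reach_terminal number memo)

-- ===== LEMMAS AND PROOFS =====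

theorem pv_fdiv2_lt (n : Int) (hn : ¬ n ≤ 10) : (PySem.Int.floordiv n 2).toNat < n.toNat := by
  rw [PySem.Int.floordiv_eq_ediv_of_pos (by norm_num)]; omega

theorem pv_fdiv3_lt (n : Int) (hn : ¬ n ≤ 10) : (PySem.Int.floordiv n 3).toNat < n.toNat := by
  rw [PySem.Int.floordiv_eq_ediv_of_pos (by norm_num)]; omega

theorem mem_pvLevel (table : PySem.Dict Int Bool) (l : List Int) (x : Int) :
    x ∈ pvLevel table l ↔ ∃ n ∈ l, x ∈ pvSucc table n := by
  induction l with
  | nil => simp [pvLevel]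
  | cons a l ih => simp [pvLevel, ih]

theorem pvMeas_le_of_mem (l : List Int) (x : Int) (hx : x ∈ l) : x.toNat ≤ pvMeas l := by
  induction l with
  | nil => cases hx
  | cons a l ih =>
    simp only [pvMeas, List.foldr] at *
    rcases List.mem_cons.mp hx with h | h
    · omega
    · have := ih h; omega

theorem pvMeas_lt_of_forall (l : List Int) (B : Nat) (h : ∀ x ∈ l, x.toNat < B) (hB : 0 < B) :
    pvMeas l < B := by
  induction l with
  | nil => simpa [pvMeas]
  | cons a l ih =>
    have h1 := h a (by simp)
    have h2 := ih (fun x hx => h x (List.mem_cons_of_mem a hx))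
    simp only [pvMeas, List.foldr] at *
    omega

-- the frontier measure strictly decreases from one level to the next
theorem pv_step_lt (table : PySem.Dict Int Bool) (frontier : List Int)
    (hne : ¬ frontier = [])
    (h10 : ¬ frontier.any (fun n => decide (n ≤ 10)) = true) :
    pvMeas (PySem.Set.ofList (pvLevel table frontier)) < pvMeas frontier := by
  have hall : ∀ n ∈ frontier, ¬ n ≤ 10 := by
    intro n hn hle
    exact h10 (List.any_eq_true.mpr ⟨n, hn, by simpa using hle⟩)
  obtain ⟨n0, hn0⟩ := List.exists_mem_of_ne_nil frontier hne
  have hpos : 0 < pvMeas frontier := by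
    have := pvMeas_le_of_mem frontier n0 hn0
    have := hall n0 hn0
    omega
  apply pvMeas_lt_of_forall _ _ _ hpos
  intro x hx
  have hx' : x ∈ pvLevel table frontier := by
    rw [PySem.Set.mem_ofList] at hx; exact hx
  obtain ⟨n, hn, hxn⟩ := (mem_pvLevel table frontier x).mp hx'
  have hn10 := hall n hn
  have hle := pvMeas_le_of_mem frontier n hn
  unfold pvSucc at hxn
  split at hxn
  · cases hxn
  · rcases List.mem_append.mp hxn with h | h <;> split at h <;> simp at h <;> subst h
    · have := pv_fdiv2_lt n hn10; omega
    · have := pv_fdiv3_lt n hn10; omega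

-- the pure value both programs compute relative to the INITIAL memo table t
def pvR (t : PySem.Dict Int Bool) (n : Int) : Bool :=
  if hn : n ≤ 10 then true
  else
    match t.get? n with
    | some b => b
    | none =>
      (decide (PySem.Int.mod n 2 = 0) && pvR t (PySem.Int.floordiv n 2)) ||
      (decide (PySem.Int.mod n 3 = 0) && pvR t (PySem.Int.floordiv n 3))
termination_by n.toNat
decreasing_by
  · exact pv_fdiv2_lt n hn
  · exact pv_fdiv3_lt n hn

theorem pvR_le (t : PySem.Dict Int Bool) (n : Int) (h : n ≤ 10) : pvR t n = true := by
  rw [pvR.eq_def]; simp [h]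

theorem pvR_hit (t : PySem.Dict Int Bool) (n : Int) (b : Bool) (h10 : ¬ n ≤ 10)
    (h : t.get? n = some b) : pvR t n = b := by
  rw [pvR.eq_def]; simp [h10, h]

theorem pvR_miss (t : PySem.Dict Int Bool) (n : Int) (h10 : ¬ n ≤ 10)
    (h : t.get? n = none) : pvR t n =
      ((decide (PySem.Int.mod n 2 = 0) && pvR t (PySem.Int.floordiv n 2)) ||
       (decide (PySem.Int.mod n 3 = 0) && pvR t (PySem.Int.floordiv n 3))) := by
  rw [pvR.eq_def]; simp [h10, h]

-- "m is t plus correct memo entries": every t-entry survives, every m-entry is a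
-- t-entry or the pure value
def pvExt (t m : PySem.Dict Int Bool) : Prop :=
  (∀ k v, t.get? k = some v → m.get? k = some v) ∧
  (∀ k v, m.get? k = some v → t.get? k = some v ∨ v = pvR t k)

theorem pvExt_refl (t : PySem.Dict Int Bool) : pvExt t t :=
  ⟨fun _ _ h => h, fun _ _ h => Or.inl h⟩

theorem pvExt_insert (t m : PySem.Dict Int Bool) (n : Int)
    (hm : pvExt t m) (hn : t.get? n = none) : pvExt t (m.insert n (pvR t n)) := by
  constructor
  · intro k v hk
    rw [PySem.Dict.get?_insert]
    split
    · rename_i hkn; subst hkn; rw [hn] at hk; cases hk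
    · exact hm.1 k v hk
  · intro k v hk
    rw [PySem.Dict.get?_insert] at hk
    split at hk
    · rename_i hkn; subst hkn; injection hk with hk; exact Or.inr hk.symm
    · exact hm.2 k v hk

-- A's memoized recursion computes the pure value and only adds correct entries
theorem canAGo_main (t : PySem.Dict Int Bool) :
    ∀ (fuel : Nat) (n : Int), n.toNat < fuel → ∀ m, pvExt t m →
      (canAGo fuel n m).1 = pvR t n ∧ pvExt t (canAGo fuel n m).2 := by
  intro fuel
  induction fuel with
  | zero => intro n hnk; omega
  | succ fuel ih =>
    intro n hnk m hm
    by_cases h10 : n ≤ 10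
    · simp only [canAGo, if_pos h10]
      exact ⟨(pvR_le t n h10).symm, hm⟩
    · simp only [canAGo, if_neg h10]
      cases hget : m.get? n with
      | some b =>
        have hb : b = pvR t n := by
          cases hgt : t.get? n with
          | some v =>
            have hv := hm.1 n v hgt
            rw [hget] at hv
            injection hv with hv
            rw [pvR_hit t n v h10 hgt, hv]
          | none =>
            rcases hm.2 n b hget with h | h
            · rw [hgt] at h; cases h
            · exact h
        exact ⟨hb, hm⟩
      | none =>
        have hgt : t.get? n = none := by
          cases hgt : t.get? n with
          | none => rfl
          | some v =>
            have := hm.1 n v hgt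
            rw [hget] at this
            cases this
        have h2k : (PySem.Int.floordiv n 2).toNat < fuel := by
          have := pv_fdiv2_lt n h10; omega
        have h3k : (PySem.Int.floordiv n 3).toNat < fuel := by
          have := pv_fdiv3_lt n h10; omega
        have hmiss := pvR_miss t n h10 hgt
        by_cases h2 : PySem.Int.mod n 2 = 0
        · have h2d : 2 ∣ n := (PySem.Int.mod_eq_zero_iff_dvd n 2).mp h2
          obtain ⟨hp1, hp2⟩ := ih (PySem.Int.floordiv n 2) h2k m hm
          simp only [if_pos h2, Bool.false_or]
          by_cases h3 : PySem.Int.mod n 3 = 0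
          · simp only [if_pos h3]
            cases hv2 : (canAGo fuel (PySem.Int.floordiv n 2) m).1 with
            | true =>
              rw [hv2] at hp1
              have hval : pvR t n = true := by
                rw [hmiss, ← hp1]; simp [h2d]
              simp only [if_pos]
              refine ⟨hval.symm, ?_⟩
              have := pvExt_insert t _ n hp2 hgt
              rwa [hval] at this
            | false =>
              rw [hv2] at hp1
              simp only [Bool.false_eq_true, if_false, Bool.false_or]
              obtain ⟨hq1, hq2⟩ := ih (PySem.Int.floordiv n 3) h3k _ hp2
              have hval : pvR t n =
                  (canAGo fuel (PySem.Int.floordiv n 3) (canAGo fuel (PySem.Int.floordiv n 2) m).2).1 := by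
                rw [hmiss, ← hp1, hq1]; simp [(PySem.Int.mod_eq_zero_iff_dvd n 3).mp h3]
              refine ⟨hval.symm, ?_⟩
              have := pvExt_insert t _ n hq2 hgt
              rwa [hval] at this
          · have h3n : ¬ 3 ∣ n := fun hd => h3 ((PySem.Int.mod_eq_zero_iff_dvd n 3).mpr hd)
            simp only [if_neg h3]
            have hval : pvR t n = (canAGo fuel (PySem.Int.floordiv n 2) m).1 := by
              rw [hmiss, hp1]; simp [h2d, h3n]
            refine ⟨hval.symm, ?_⟩
            have := pvExt_insert t _ n hp2 hgt
            rwa [hval] at this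
        · have h2n : ¬ 2 ∣ n := fun hd => h2 ((PySem.Int.mod_eq_zero_iff_dvd n 2).mpr hd)
          simp only [if_neg h2]
          by_cases h3 : PySem.Int.mod n 3 = 0
          · have h3d : 3 ∣ n := (PySem.Int.mod_eq_zero_iff_dvd n 3).mp h3
            simp only [if_pos h3, Bool.false_eq_true, if_false, Bool.false_or]
            obtain ⟨hq1, hq2⟩ := ih (PySem.Int.floordiv n 3) h3k m hm
            have hval : pvR t n = (canAGo fuel (PySem.Int.floordiv n 3) m).1 := by
              rw [hmiss, hq1]; simp [h2n, h3d]
            refine ⟨hval.symm, ?_⟩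
            have := pvExt_insert t _ n hq2 hgt
            rwa [hval] at this
          · have h3n : ¬ 3 ∣ n := fun hd => h3 ((PySem.Int.mod_eq_zero_iff_dvd n 3).mpr hd)
            simp only [if_neg h3]
            have hval : pvR t n = false := by
              rw [hmiss]; simp [h2n, h3n]
            refine ⟨hval.symm, ?_⟩
            have := pvExt_insert t _ n hm hgt
            rwa [hval] at this

-- B's loop returns whether some frontier element has pure value true
theorem canBLoop_main (t : PySem.Dict Int Bool) :
    ∀ (fuel : Nat) (frontier : List Int), pvMeas frontier < fuel →
      canBLoop fuel t frontier = frontier.any (fun n => pvR t n) := by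
  intro fuel
  induction fuel with
  | zero => intro frontier hk; omega
  | succ fuel ih =>
    intro frontier hk
    by_cases hne : frontier = []
    · simp [canBLoop, hne]
    · simp only [canBLoop, if_neg hne]
      by_cases h10 : frontier.any (fun n => decide (n ≤ 10)) = true
      · simp only [if_pos h10]
        obtain ⟨n, hn, hle⟩ := List.any_eq_true.mp h10
        exact (List.any_eq_true.mpr ⟨n, hn, by simp [pvR_le t n (by simpa using hle)]⟩).symm
      · simp only [if_neg h10]
        have hall10 : ∀ n ∈ frontier, ¬ n ≤ 10 := fun n hn hle =>
          h10 (List.any_eq_true.mpr ⟨n, hn, by simpa using hle⟩)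
        by_cases hhit : frontier.any (fun n => t.getD n false) = true
        · simp only [if_pos hhit]
          obtain ⟨n, hn, hb⟩ := List.any_eq_true.mp hhit
          have hg : t.get? n = some true := by
            cases hg : t.get? n with
            | none => rw [PySem.Dict.getD_of_get?_eq_none t false hg] at hb; cases hb
            | some b =>
              rw [PySem.Dict.getD_of_get?_eq_some t false hg] at hb
              rw [hb]
          exact (List.any_eq_true.mpr
            ⟨n, hn, by simp [pvR_hit t n true (hall10 n hn) hg]⟩).symm
        · simp only [if_neg hhit]
          have hstep := pv_step_lt t frontier hne h10
          rw [ih (PySem.Set.ofList (pvLevel t frontier)) (by omega)]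
          apply Bool.coe_iff_coe.mp
          simp only [List.any_eq_true]
          constructor
          · rintro ⟨x, hx, hxR⟩
            rw [PySem.Set.mem_ofList] at hx
            obtain ⟨n, hn, hxn⟩ := (mem_pvLevel t frontier x).mp hx
            refine ⟨n, hn, ?_⟩
            unfold pvSucc at hxn
            split at hxn
            · cases hxn
            · rename_i hcont
              have hgt : t.get? n = none := by
                cases hg : t.get? n with
                | none => rfl
                | some b =>
                  exfalso; apply hcont
                  rw [PySem.Dict.contains_eq_isSome_get?, hg]; rfl
              rw [pvR_miss t n (hall10 n hn) hgt]
              rcases List.mem_append.mp hxn with h | h <;> split at h <;> simp at h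
              · rename_i h2; subst h
                simp [hxR, (PySem.Int.mod_eq_zero_iff_dvd n 2).mp h2]
              · rename_i h3; subst h
                simp [hxR, (PySem.Int.mod_eq_zero_iff_dvd n 3).mp h3]
          · rintro ⟨n, hn, hnR⟩
            have h10n := hall10 n hn
            have hhitn : t.getD n false = false := by
              cases hb : t.getD n false with
              | false => rfl
              | true => exact absurd (List.any_eq_true.mpr ⟨n, hn, by simp [hb]⟩) hhit
            cases hg : t.get? n with
            | some b =>
              have hbf : b = false := by
                rw [PySem.Dict.getD_of_get?_eq_some t false hg] at hhitn; exact hhitn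
              rw [pvR_hit t n b h10n hg, hbf] at hnR
              cases hnR
            | none =>
              rw [pvR_miss t n h10n hg] at hnR
              have hcont : ¬ t.contains n = true := by
                rw [PySem.Dict.contains_eq_isSome_get?, hg]; simp
              simp at hnR
              rcases hnR with ⟨h2, hR⟩ | ⟨h3, hR⟩
              · refine ⟨n / 2, ?_, hR⟩
                rw [PySem.Set.mem_ofList]
                refine (mem_pvLevel t frontier _).mpr ⟨n, hn, ?_⟩
                unfold pvSucc
                rw [if_neg hcont]
                simp
                exact Or.inl h2
              · refine ⟨n / 3, ?_, hR⟩
                rw [PySem.Set.mem_ofList]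
                refine (mem_pvLevel t frontier _).mpr ⟨n, hn, ?_⟩
                unfold pvSucc
                rw [if_neg hcont]
                simp
                exact Or.inr h3

-- ===== VERDICT (by name: the statement is the Claim_ definition above) =====
theorem can_reach_terminal_spec : Claim_equal_can_reach_terminal := by
  intro number memo _
  unfold Spec_can_reach_terminal can_reach_terminal can_reach_terminal_alt
  have htab : (PySem.Dict.mk (match memo with
      | none => ([] : List (Int × Bool))
      | some l => if l.isEmpty then [] else l)) = PySem.Dict.mk (memo.getD []) := by
    cases memo with
    | none => rfl
    | some l => cases l <;> rfl
  rw [htab]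
  have hA := canAGo_main (PySem.Dict.mk (memo.getD [])) (number.toNat + 1) number
    (by omega) (PySem.Dict.mk (memo.getD [])) (pvExt_refl _)
  rw [hA.1]
  have hone : PySem.Set.ofList [number] = [number] := rfl
  rw [canBLoop_main (PySem.Dict.mk (memo.getD []))
    (pvMeas (PySem.Set.ofList [number]) + 1) (PySem.Set.ofList [number]) (by omega)]
  rw [hone]
  simp [List.any]
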